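-- pv_equiv track=rewrite | github.com/Sagarl17/xyzautomation | main.py | ID_points
-- ===== SOURCE A (Python) =====
-- def ID_points(point_3d,len_cube,range_of_cube):
--
-- 	point_id = []
-- 	dummy_point = point_3d[:][:]
-- 	point_id = []
-- 	for point in dummy_point:
-- 		point_x = point[0]//len_cube
-- 		point_y = point[1]//len_cube
-- 		point_z = point[2]//len_cube
-- 		point_id.append(point_x*range_of_cube[1]*range_of_cube[2]+point_y*range_of_cube[2]+point_z)
--
--
-- 	unique_cube = sorted(list(set(point_id)))
--
-- 	#######################################################################
-- 	#                Creating Dictionary for each unique ID               #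
--
-- 	diction = dict()
-- 	count = 0
-- 	for i in point_id:
-- 		if i in diction:
-- 			diction[i].append(point_3d[count])
-- 		else :
-- 			diction[i]= [point_3d[count]]
-- 		count += 1
--
-- 	return unique_cube,diction
-- ===== SOURCE B (Python) =====
-- def ID_points(point_3d, len_cube, range_of_cube):
--     # Per-key gathering: compute the ids once, take the distinct ids in first-occurrence
--     # order, and build each group by its own filtering pass (no incremental grouping dict,
--     # no count index).
--     ids = [(p[0] // len_cube) * range_of_cube[1] * range_of_cube[2]
--            + (p[1] // len_cube) * range_of_cube[2] + p[2] // len_cube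
--            for p in point_3d]
--     keys = list(dict.fromkeys(ids))
--     diction = {k: [p for p, i in zip(point_3d, ids) if i == k] for k in keys}
--     return sorted(keys), diction
-- ===== Notes on version B (the rewrite author's own statement) =====
-- stated objective: alternative
-- what changed: Instead of one counted pass that grows per-id lists inside a grouping dict, B computes the id list, dedups it into the first-occurrence key order, and builds each group by its own filtering pass over zip(point_3d, ids); it trades the single grouping pass for per-key scans.
import Mathlib
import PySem

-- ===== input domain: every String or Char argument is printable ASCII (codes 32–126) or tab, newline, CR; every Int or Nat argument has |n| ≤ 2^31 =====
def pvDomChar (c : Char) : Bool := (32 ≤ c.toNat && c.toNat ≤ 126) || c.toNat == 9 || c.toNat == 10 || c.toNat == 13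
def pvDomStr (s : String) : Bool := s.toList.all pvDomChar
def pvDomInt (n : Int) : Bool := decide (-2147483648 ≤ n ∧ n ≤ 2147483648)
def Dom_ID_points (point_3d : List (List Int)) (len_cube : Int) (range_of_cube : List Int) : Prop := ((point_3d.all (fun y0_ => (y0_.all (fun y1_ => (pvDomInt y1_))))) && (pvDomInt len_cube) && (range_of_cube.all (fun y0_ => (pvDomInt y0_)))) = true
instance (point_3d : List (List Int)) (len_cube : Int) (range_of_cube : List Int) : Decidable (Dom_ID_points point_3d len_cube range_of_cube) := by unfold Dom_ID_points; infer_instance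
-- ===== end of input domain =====

-- B replaces A's counted single-pass dict grouping by a dedup of the id list followed by one filtering pass per distinct id (alternative decomposition, not claimed faster).

-- ===== PORT A =====
def ID_points (point_3d : List (List Int)) (len_cube : Int) (range_of_cube : List Int) : List Int × (List (Int × List (List Int))) :=
  -- point_3d[:][:] is a shallow copy: same list value
  let dummy_point := point_3d
  let point_id : List Int := dummy_point.foldl (fun acc point =>
    let point_x := PySem.Int.floordiv (PySem.List.pyGetD point 0 0) len_cube
    let point_y := PySem.Int.floordiv (PySem.List.pyGetD point 1 0) len_cube
    let point_z := PySem.Int.floordiv (PySem.List.pyGetD point 2 0) len_cube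
    acc ++ [point_x * PySem.List.pyGetD range_of_cube 1 0 * PySem.List.pyGetD range_of_cube 2 0
            + point_y * PySem.List.pyGetD range_of_cube 2 0 + point_z]) []
  let unique_cube := PySem.List.sorted (PySem.Set.ofList point_id) (fun x => x) false
  let st : PySem.Dict Int (List (List Int)) × Int := point_id.foldl (fun st i =>
    if st.1.contains i then
      (st.1.modify i [] (fun v => v ++ [PySem.List.pyGetD point_3d st.2 []]), st.2 + 1)
    else
      (st.1.insert i [PySem.List.pyGetD point_3d st.2 []], st.2 + 1)) (PySem.Dict.empty, 0)
  (unique_cube, st.1.items)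


-- ===== PORT B =====
def ID_points_alt (point_3d : List (List Int)) (len_cube : Int) (range_of_cube : List Int) : List Int × (List (Int × List (List Int))) :=
  let ids : List Int := point_3d.map (fun p =>
    PySem.Int.floordiv (PySem.List.pyGetD p 0 0) len_cube
      * PySem.List.pyGetD range_of_cube 1 0 * PySem.List.pyGetD range_of_cube 2 0
    + PySem.Int.floordiv (PySem.List.pyGetD p 1 0) len_cube * PySem.List.pyGetD range_of_cube 2 0
    + PySem.Int.floordiv (PySem.List.pyGetD p 2 0) len_cube)
  let keys := PySem.List.dedup ids
  let diction : PySem.Dict Int (List (List Int)) := keys.foldl (fun d k =>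
    d.insert k (((point_3d.zip ids).filter (fun q => q.2 == k)).map (fun q => q.1))) PySem.Dict.empty
  (PySem.List.sorted keys (fun x => x) false, diction.items)


-- ===== PRECONDITION & SPEC =====
-- Pre_ excludes exactly the inputs where A raises: with at least one point,
-- len_cube = 0 (ZeroDivisionError), range_of_cube shorter than 3, or some point shorter than 3 (IndexError).
def Pre_ID_points (point_3d : List (List Int)) (len_cube : Int) (range_of_cube : List Int) : Prop :=
  (∀ p ∈ point_3d, 3 ≤ p.length) ∧ (point_3d ≠ [] → len_cube ≠ 0 ∧ 3 ≤ range_of_cube.length)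
instance (point_3d : List (List Int)) (len_cube : Int) (range_of_cube : List Int) : Decidable (Pre_ID_points point_3d len_cube range_of_cube) := by unfold Pre_ID_points; infer_instance
def pvWitness_ID_points : List (List Int) × Int × List Int := ([[0, 0, 0], [5, 2, 9], [5, 2, 9]], 2, [3, 3, 3])
def Spec_ID_points (point_3d : List (List Int)) (len_cube : Int) (range_of_cube : List Int) (out : List Int × (List (Int × List (List Int)))) : Prop := out = ID_points_alt point_3d len_cube range_of_cube
instance (point_3d : List (List Int)) (len_cube : Int) (range_of_cube : List Int) (out : List Int × (List (Int × List (List Int)))) : Decidable (Spec_ID_points point_3d len_cube range_of_cube out) := by unfold Spec_ID_points; infer_instance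

-- ===== CLAIM (what is proved, stated in full; the proofs are below) =====
def Claim_equal_ID_points : Prop := ∀ (point_3d : List (List Int)) (len_cube : Int) (range_of_cube : List Int), Dom_ID_points point_3d len_cube range_of_cube → Pre_ID_points point_3d len_cube range_of_cube → Spec_ID_points point_3d len_cube range_of_cube (ID_points point_3d len_cube range_of_cube)

-- ===== LEMMAS AND PROOFS =====

lemma pv_drop_getD (full : List (List Int)) (c : Nat) (p : List Int) (rest : List (List Int))
    (h : full.drop c = p :: rest) : PySem.List.pyGetD full (c : Int) [] = p := by
  have h2 : (full.drop c)[(0 : Nat)]? = full[c + 0]? := List.getElem?_drop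
  rw [h] at h2
  simp at h2
  simp [PySem.List.pyGetD_natCast, List.getD, h2.symm]

lemma pv_modify_eq_insert (d : PySem.Dict Int (List (List Int))) (k : Int)
    (g : List (List Int) → List (List Int)) :
    d.modify k [] g = d.insert k (g (d.getD k [])) := rfl

-- A's counted second loop over the id list equals a direct grouping fold keyed by f.
lemma pv_loop_eq (f : List Int → Int) (full : List (List Int)) :
    ∀ (ps : List (List Int)) (c : Nat) (d : PySem.Dict Int (List (List Int))),
    full.drop c = ps →
    (ps.map f).foldl (fun st i =>
        if st.1.contains i then
          (st.1.modify i [] (fun v => v ++ [PySem.List.pyGetD full st.2 []]), st.2 + 1)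
        else
          (st.1.insert i [PySem.List.pyGetD full st.2 []], st.2 + 1)) (d, (c : Int))
    = (ps.foldl (fun d p => d.insert (f p) (d.getD (f p) [] ++ [p])) d,
       (c : Int) + ps.length) := by
  intro ps
  induction ps with
  | nil => intro c d _; simp
  | cons p rest ih =>
    intro c d h
    have hp : PySem.List.pyGetD full (c : Int) [] = p := pv_drop_getD full c p rest h
    have hdrop : full.drop (c + 1) = rest := by
      have h2 : (full.drop c).drop 1 = full.drop (c + 1) := by
        rw [List.drop_drop]
      rw [h] at h2
      simpa using h2.symm
    simp only [List.map_cons, List.foldl_cons]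
    by_cases hc : d.contains (f p) = true
    · rw [if_pos hc]
      have step : d.modify (f p) [] (fun v => v ++ [PySem.List.pyGetD full (c : Int) []])
          = d.insert (f p) (d.getD (f p) [] ++ [p]) := by
        rw [pv_modify_eq_insert, hp]
      rw [step]
      have := ih (c + 1) (d.insert (f p) (d.getD (f p) [] ++ [p])) hdrop
      push_cast at this ⊢
      rw [this]
      congr 1
      simp [List.length_cons]; ring
    · rw [if_neg hc]
      have hget : d.getD (f p) [] = [] :=
        PySem.Dict.getD_of_not_contains d [] (by simpa using hc)
      have step : d.insert (f p) [PySem.List.pyGetD full (c : Int) []]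
          = d.insert (f p) (d.getD (f p) [] ++ [p]) := by
        rw [hp, hget]; rfl
      rw [step]
      have := ih (c + 1) (d.insert (f p) (d.getD (f p) [] ++ [p])) hdrop
      push_cast at this ⊢
      rw [this]
      congr 1
      simp [List.length_cons]; ring

-- The keys collected by the grouping fold are exactly the first-occurrence-distinct ids.
lemma pv_keys_eq (f : List Int → Int) (ps : List (List Int)) :
    (ps.foldl (fun d p => d.insert (f p) (d.getD (f p) [] ++ [p]))
      (PySem.Dict.empty : PySem.Dict Int (List (List Int)))).keys
    = PySem.Set.ofList (ps.map f) := by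
  rw [PySem.Dict.keys_foldl_insert_key]
  simp [PySem.Dict.keys_empty]
  rfl

-- Each lookup in the grouping fold is the filter of the points with that id.
lemma pv_getD_group (f : List Int → Int) (ps : List (List Int)) (c : Int) :
    (ps.foldl (fun d p => d.insert (f p) (d.getD (f p) [] ++ [p]))
      (PySem.Dict.empty : PySem.Dict Int (List (List Int)))).getD c []
    = ps.filter (fun p => f p == c) := by
  have h1 : ps.foldl (fun d p => d.insert (f p) (d.getD (f p) [] ++ [p]))
      (PySem.Dict.empty : PySem.Dict Int (List (List Int)))
      = (ps.map (fun p => (f p, p))).foldl (fun d q => d.modify q.1 [] (fun v => v ++ [q.2]))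
          PySem.Dict.empty := by
    rw [List.foldl_map]; rfl
  rw [h1, PySem.Dict.getD_foldl_modify_append]
  simp [List.filter_map, Function.comp_def, List.map_map]

-- B's per-key filtering pass over zip(point_3d, ids) is the plain filter of the points.
lemma pv_zip_filter (f : List Int → Int) (ps : List (List Int)) (c : Int) :
    (((ps.zip (ps.map f)).filter (fun q => q.2 == c)).map (fun q => q.1))
    = ps.filter (fun p => f p == c) := by
  induction ps with
  | nil => simp
  | cons p rest ih =>
    by_cases h : f p = c <;> simp [h, ih]

-- ===== VERDICT (by name: the statement is the Claim_ definition above) =====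
theorem ID_points_spec : Claim_equal_ID_points := by
  intro point_3d len_cube range_of_cube _ _
  unfold Spec_ID_points ID_points ID_points_alt
  simp only [PySem.List.foldl_append_singleton_eq_map, List.nil_append]
  set f : List Int → Int := fun p =>
    PySem.Int.floordiv (PySem.List.pyGetD p 0 0) len_cube
      * PySem.List.pyGetD range_of_cube 1 0 * PySem.List.pyGetD range_of_cube 2 0
    + PySem.Int.floordiv (PySem.List.pyGetD p 1 0) len_cube * PySem.List.pyGetD range_of_cube 2 0
    + PySem.Int.floordiv (PySem.List.pyGetD p 2 0) len_cube with hf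
  have h0 := pv_loop_eq f point_3d point_3d 0 PySem.Dict.empty (by simp)
  push_cast at h0
  rw [h0]
  -- both uniques
  rw [PySem.List.dedup_eq_ofList]
  -- A's items in canonical form
  have hnd : (point_3d.foldl (fun d p => d.insert (f p) (d.getD (f p) [] ++ [p]))
      (PySem.Dict.empty : PySem.Dict Int (List (List Int)))).keys.Nodup := by
    rw [pv_keys_eq]; exact PySem.Set.nodup_ofList _
  have hA := PySem.Dict.items_eq_map_keys _ hnd ([] : List (List Int))
  rw [pv_keys_eq] at hA
  simp only [pv_getD_group] at hA
  -- B's items by the fresh-insert lemma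
  have hB := PySem.Dict.items_foldl_insert_fresh
      (PySem.Set.ofList (point_3d.map f)) (fun k => k)
      (fun k => (((point_3d.zip (point_3d.map f)).filter (fun q => q.2 == k)).map (fun q => q.1)))
      PySem.Dict.empty (by intro a _; simp) (by simpa using PySem.Set.nodup_ofList (point_3d.map f))
  rw [hA, hB]
  simp only [pv_zip_filter, PySem.Dict.empty, List.nil_append]
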